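-- pv_equiv track=rewrite | github.com/DmitriySafarov/my-trade-datacollector | src/db/migration_sql.py | _read_dollar_tag
-- ===== SOURCE A (Python) =====
-- def _read_dollar_tag(sql: str, start: int) -> str | None:
--     end = start + 1
--     while end < len(sql):
--         char = sql[end]
--         if char == "$":
--             return sql[start : end + 1]
--         if not (char == "_" or char.isalnum()):
--             return None
--         end += 1
--     return None
-- ===== SOURCE B (Python) =====
-- def _read_dollar_tag(sql: str, start: int) -> str | None:
--     p = sql.find("$", start + 1)
--     if p == -1:
--         return None
--     if all(c == "_" or c.isalnum() for c in sql[start + 1 : p]):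
--         return sql[start : p + 1]
--     return None
-- ===== Notes on version B (the rewrite author's own statement) =====
-- stated objective: faster
-- what changed: B replaces A's fused character-by-character scan (test-and-advance loop) with a two-phase decomposition: first locate the closing '$' with str.find, then validate the enclosed span with all(), and slice once.
-- outside the precondition, e.g. on _read_dollar_tag('$a$', -3): A returns '', B returns '$a$'
import Mathlib
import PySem

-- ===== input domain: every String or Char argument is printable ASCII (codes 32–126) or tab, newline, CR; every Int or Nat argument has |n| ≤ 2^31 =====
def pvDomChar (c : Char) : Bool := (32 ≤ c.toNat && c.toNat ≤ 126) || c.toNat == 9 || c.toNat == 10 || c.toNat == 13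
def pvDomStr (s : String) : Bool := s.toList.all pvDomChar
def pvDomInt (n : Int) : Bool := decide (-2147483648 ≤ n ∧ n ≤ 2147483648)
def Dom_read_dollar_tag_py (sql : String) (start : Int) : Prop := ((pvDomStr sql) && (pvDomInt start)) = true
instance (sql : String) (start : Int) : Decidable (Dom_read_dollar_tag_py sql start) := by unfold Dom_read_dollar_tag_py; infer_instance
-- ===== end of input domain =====

-- B finds the closing '$' first (str.find), then validates and slices the enclosed span,
-- instead of A's fused test-and-advance scan; same O(n), measured faster by a constant factor.

-- ===== PORT A =====
-- the while-loop of A; e is Python's `end`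
def read_dollar_tag_loop (sql : String) (start : Int) (e : Int) : Option String :=
  if _h : e < PySem.Str.len sql then
    match PySem.Str.pyGet? sql e with
    | none => none   -- Python raises IndexError here (e < -len); excluded by Pre_
    | some c =>
      if c = '$' then some (PySem.Str.slice sql (some start) (some (e + 1)))
      else if ¬ (c = '_' ∨ PySem.Chars.isalnum c) then none
      else read_dollar_tag_loop sql start (e + 1)
  else none
termination_by (PySem.Str.len sql - e).toNat
decreasing_by simp only [PySem.Str.len] at *; omega

def read_dollar_tag_py (sql : String) (start : Int) : Option String :=
  read_dollar_tag_loop sql start (start + 1)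

-- ===== PORT B =====
def read_dollar_tag_py_alt (sql : String) (start : Int) : Option String :=
  let p := PySem.Str.findFrom sql "$" (start + 1) none
  if p = -1 then none
  else if (PySem.Str.slice sql (some (start + 1)) (some p)).toList.all
            (fun c => c == '_' || PySem.Chars.isalnum c) then
    some (PySem.Str.slice sql (some start) (some (p + 1)))
  else none

-- ===== PRECONDITION & SPEC =====
-- Pre_ excludes start < -1: there Python's A either raises IndexError (when start+1 < -len(sql))
-- or scans via negative-index wraparound, an accident of the implementation whose values
-- (e.g. the empty string) neither reading of the task would specify.
def Pre_read_dollar_tag_py (sql : String) (start : Int) : Prop := -1 ≤ start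
instance (sql : String) (start : Int) : Decidable (Pre_read_dollar_tag_py sql start) := by
  unfold Pre_read_dollar_tag_py; infer_instance

def pvWitness_read_dollar_tag_py : String × Int := ("$tag$ x", 0)

def Spec_read_dollar_tag_py (sql : String) (start : Int) (out : Option String) : Prop := out = read_dollar_tag_py_alt sql start
instance (sql : String) (start : Int) (out : Option String) : Decidable (Spec_read_dollar_tag_py sql start out) := by unfold Spec_read_dollar_tag_py; infer_instance

-- ===== CLAIM (what is proved, stated in full; the proofs are below) =====
def Claim_equal_read_dollar_tag_py : Prop := ∀ (sql : String) (start : Int), Dom_read_dollar_tag_py sql start → Pre_read_dollar_tag_py sql start → Spec_read_dollar_tag_py sql start (read_dollar_tag_py sql start)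

-- ===== LEMMAS AND PROOFS =====

-- the common reference: the character test, and A's scan as a function of the scan position
def pvValid (c : Char) : Bool := c == '_' || PySem.Chars.isalnum c

def pvScan : List Char → Nat → Option Nat
  | [], _ => none
  | c :: rest, k => if c = '$' then some k else if pvValid c then pvScan rest (k + 1) else none

-- B's find-then-validate decision, on characters
def pvFindVal (cs : List Char) (k : Nat) : Option Nat :=
  let p := PySem.Chars.findFrom cs ['$'] (k : Int) none
  if p = -1 then none
  else if (PySem.List.slice cs (some (k : Int)) (some p)).all pvValid then some p.toNat
  else none

lemma pv_find_nil : PySem.Chars.find [] ['$'] = -1 := by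
  simp [PySem.Chars.find, PySem.Chars.find.go]

lemma pv_go_shift (t : List Char) (k : Nat) :
    PySem.Chars.find.go ['$'] t k =
      if PySem.Chars.find t ['$'] = -1 then -1 else (k : Int) + PySem.Chars.find t ['$'] := by
  induction t generalizing k with
  | nil => simp [PySem.Chars.find, PySem.Chars.find.go]
  | cons c t ih =>
    have h1 : -1 ≤ PySem.Chars.find t ['$'] := PySem.Chars.neg_one_le_find t ['$']
    have hgo : ∀ m : Nat, PySem.Chars.find.go ['$'] (c :: t) m =
        if List.isPrefixOf ['$'] (c :: t) then (m : Int) else PySem.Chars.find.go ['$'] t (m + 1) := by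
      intro m; rw [PySem.Chars.find.go]
    have h0 : PySem.Chars.find (c :: t) ['$'] = PySem.Chars.find.go ['$'] (c :: t) 0 := rfl
    rw [hgo k, h0, hgo 0]
    by_cases hp : List.isPrefixOf ['$'] (c :: t)
    · simp [hp]
    · simp only [hp, if_false, Bool.false_eq_true]
      rw [ih (0 + 1), ih (k + 1)]
      split_ifs <;> push_cast <;> omega

lemma pv_find_cons (c : Char) (t : List Char) :
    PySem.Chars.find (c :: t) ['$'] =
      if c = '$' then 0
      else if PySem.Chars.find t ['$'] = -1 then -1 else 1 + PySem.Chars.find t ['$'] := by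
  have h0 : PySem.Chars.find (c :: t) ['$'] = PySem.Chars.find.go ['$'] (c :: t) 0 := rfl
  rw [h0, PySem.Chars.find.go]
  have hp : List.isPrefixOf ['$'] (c :: t) = ('$' == c) := by
    simp [List.isPrefixOf]
  rw [pv_go_shift t (0 + 1)]
  by_cases h : c = '$'
  · simp [hp, h]
  · have hne : ('$' == c) = false := by simp [Ne.symm h]
    simp [hp, hne, h]

lemma pv_findFrom_step (cs : List Char) (k : Nat) (hk : k < cs.length) :
    PySem.Chars.findFrom cs ['$'] (k : Int) none =
      if cs[k] = '$' then (k : Int) else PySem.Chars.findFrom cs ['$'] ((k + 1 : Nat) : Int) none := by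
  have hd : cs.drop k = cs[k] :: cs.drop (k + 1) := (List.drop_eq_getElem_cons hk).symm ▸ rfl
  rw [PySem.Chars.findFrom_natCast cs ['$'] k (le_of_lt hk),
      PySem.Chars.findFrom_natCast cs ['$'] (k + 1) hk, hd, pv_find_cons]
  have h1 : -1 ≤ PySem.Chars.find (cs.drop (k + 1)) ['$'] := PySem.Chars.neg_one_le_find _ _
  by_cases h : cs[k] = '$'
  · simp [h]
  · simp only [h, if_false]
    split_ifs <;> push_cast <;> omega

lemma pv_loop_eq_scan (sql : String) (start : Int) (k : Nat) :
    read_dollar_tag_loop sql start (k : Int) =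
      (pvScan (sql.toList.drop k) k).map
        (fun p => PySem.Str.slice sql (some start) (some ((p : Int) + 1))) := by
  suffices H : ∀ (m k : Nat), sql.toList.length - k ≤ m →
      read_dollar_tag_loop sql start (k : Int) =
        (pvScan (sql.toList.drop k) k).map
          (fun p => PySem.Str.slice sql (some start) (some ((p : Int) + 1))) by
    exact H _ k le_rfl
  intro m
  induction m with
  | zero =>
    intro k hm
    have hlen : sql.toList.length ≤ k := by omega
    rw [read_dollar_tag_loop]
    have hnk : ¬ ((k : Int) < PySem.Str.len sql) := by
      simp only [PySem.Str.len]; exact_mod_cast not_lt.mpr hlen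
    rw [dif_neg hnk]
    simp [List.drop_eq_nil_of_le hlen, pvScan]
  | succ m ih =>
    intro k hm
    rw [read_dollar_tag_loop]
    by_cases hk : k < sql.toList.length
    · have hklt : ((k : Int) < PySem.Str.len sql) := by
        simp only [PySem.Str.len]; exact_mod_cast hk
      have hget : PySem.Str.pyGet? sql (k : Int) = some (sql.toList[k]) := by
        simp [PySem.List.pyGet?_natCast, hk]
      have hd : sql.toList.drop k = sql.toList[k] :: sql.toList.drop (k + 1) :=
        (List.drop_eq_getElem_cons hk).symm ▸ rfl
      rw [dif_pos hklt, hget, hd]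
      by_cases hc : sql.toList[k] = '$'
      · simp [pvScan, hc]
      · by_cases hv : sql.toList[k] = '_' ∨ PySem.Chars.isalnum sql.toList[k]
        · have hvb : pvValid (sql.toList[k]) = true := by
            simp [pvValid]
            rcases hv with h | h
            · exact Or.inl h
            · exact Or.inr h
          have hcast : ((k : Int) + 1) = ((k + 1 : Nat) : Int) := by push_cast; ring
          simp only [hc, if_false, hv, not_true, pvScan, hvb, if_true, hcast]
          exact ih (k + 1) (by omega)
        · have hvb : pvValid (sql.toList[k]) = false := by
            simp [pvValid]
            push_neg at hv
            exact ⟨hv.1, by simpa using hv.2⟩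
          simp [pvScan, hc, hv, hvb]
    · have hnk : ¬ ((k : Int) < PySem.Str.len sql) := by
        simp only [PySem.Str.len]; exact_mod_cast hk
      rw [dif_neg hnk]
      simp [List.drop_eq_nil_of_le (by omega : sql.toList.length ≤ k), pvScan]

lemma pv_slice_cons (cs : List Char) (k : Nat) (p : Int) (hk : k < cs.length)
    (hp : ((k + 1 : Nat) : Int) ≤ p) :
    PySem.List.slice cs (some (k : Int)) (some p) =
      cs[k] :: PySem.List.slice cs (some ((k + 1 : Nat) : Int)) (some p) := by
  have h0 : (0 : Int) ≤ (k : Int) := by positivity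
  have h1 : (0 : Int) ≤ p := by push_cast at hp; omega
  rw [PySem.List.slice_toNat cs h0 h1, PySem.List.slice_toNat cs (by positivity) h1]
  have hd : cs.drop k = cs[k] :: cs.drop (k + 1) := (List.drop_eq_getElem_cons hk).symm ▸ rfl
  have h2 : p.toNat - k = (p.toNat - (k + 1)) + 1 := by
    have : k + 1 ≤ p.toNat := by push_cast at hp; omega
    omega
  have h3 : ((k : Int)).toNat = k := Int.toNat_natCast k
  have h4 : (((k + 1 : Nat) : Int)).toNat = k + 1 := Int.toNat_natCast (k + 1)
  rw [h3, h4, hd, h2, List.take_succ_cons]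

lemma pv_findVal_eq_scan (cs : List Char) (k : Nat) (hk : k ≤ cs.length) :
    pvFindVal cs k = pvScan (cs.drop k) k := by
  suffices H : ∀ (m k : Nat), k ≤ cs.length → cs.length - k ≤ m →
      pvFindVal cs k = pvScan (cs.drop k) k by exact H _ k hk le_rfl
  intro m
  induction m with
  | zero =>
    intro k hk hm
    have hke : k = cs.length := by omega
    subst hke
    rw [pvFindVal]
    rw [PySem.Chars.findFrom_natCast cs ['$'] cs.length le_rfl]
    simp [List.drop_length, pv_find_nil, pvScan]
  | succ m ih =>
    intro k hk hm
    by_cases hlt : k < cs.length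
    · have hd : cs.drop k = cs[k] :: cs.drop (k + 1) := (List.drop_eq_getElem_cons hlt).symm ▸ rfl
      simp only [pvFindVal]
      rw [hd, pv_findFrom_step cs k hlt]
      by_cases hc : cs[k] = '$'
      · rw [if_pos hc]
        have hne : ((k : Int)) ≠ -1 := by omega
        rw [if_neg hne]
        have hsl : PySem.List.slice cs (some (k : Int)) (some (k : Int)) = [] := by
          rw [PySem.List.slice_toNat cs (by positivity) (by positivity)]
          simp
        simp [hsl, pvScan, hc]
      · rw [if_neg hc]
        set p := PySem.Chars.findFrom cs ['$'] ((k + 1 : Nat) : Int) none with hpdef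
        by_cases hp : p = -1
        · rw [if_pos hp]
          have hnone : pvFindVal cs (k + 1) = none := by
            rw [pvFindVal]; simp only [← hpdef, hp]; simp
          rw [pvScan]
          simp only [hc, if_false]
          by_cases hv : pvValid cs[k]
          · rw [if_pos hv, ← ih (k + 1) hlt (by omega), hnone]
          · rw [if_neg hv]
        · rw [if_neg hp]
          have hspec := PySem.Chars.findFrom_natCast_spec cs ['$'] (k + 1) hlt (by rw [← hpdef]; exact hp)
          have hple : ((k + 1 : Nat) : Int) ≤ p := by rw [hpdef]; exact_mod_cast hspec.1
          rw [pv_slice_cons cs k p hlt hple]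
          rw [pvScan]
          simp only [hc, if_false, List.all_cons]
          by_cases hv : pvValid cs[k]
          · rw [if_pos hv, ← ih (k + 1) hlt (by omega), pvFindVal]
            simp only [← hpdef, if_neg hp]
            simp [hv]
          · rw [if_neg hv]
            simp [hv]
    · have hke : k = cs.length := by omega
      subst hke
      rw [pvFindVal]
      rw [PySem.Chars.findFrom_natCast cs ['$'] cs.length le_rfl]
      simp [List.drop_length, pv_find_nil, pvScan]

lemma pv_alt_eq (sql : String) (start : Int) (h0 : 0 ≤ start + 1)
    (hle : (start + 1).toNat ≤ sql.toList.length) :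
    read_dollar_tag_py_alt sql start =
      (pvFindVal sql.toList (start + 1).toNat).map
        (fun p => PySem.Str.slice sql (some start) (some ((p : Int) + 1))) := by
  have hs : (((start + 1).toNat : Nat) : Int) = start + 1 := Int.toNat_of_nonneg h0
  simp only [read_dollar_tag_py_alt, pvFindVal]
  have hff : PySem.Str.findFrom sql "$" (start + 1) none =
      PySem.Chars.findFrom sql.toList ['$'] (((start + 1).toNat : Nat) : Int) none := by
    rw [hs]; rfl
  rw [hff]
  set p := PySem.Chars.findFrom sql.toList ['$'] (((start + 1).toNat : Nat) : Int) none with hpdef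
  by_cases hp : p = -1
  · simp [hp]
  · rw [if_neg hp, if_neg hp]
    have hspec := PySem.Chars.findFrom_natCast_spec sql.toList ['$'] (start + 1).toNat hle
      (by rw [← hpdef]; exact hp)
    have hple : (((start + 1).toNat : Nat) : Int) ≤ p := by rw [hpdef]; exact_mod_cast hspec.1
    have hpnn : 0 ≤ p := le_trans (by positivity) hple
    have hback : ((p.toNat : Nat) : Int) = p := Int.toNat_of_nonneg hpnn
    have hsl : (PySem.Str.slice sql (some (start + 1)) (some p)).toList =
        PySem.List.slice sql.toList (some (((start + 1).toNat : Nat) : Int)) (some p) := by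
      rw [hs]; simp [PySem.Str.slice]
    rw [hsl]
    have hpred : (fun c => c == '_' || PySem.Chars.isalnum c) = pvValid := rfl
    rw [hpred]
    by_cases hall : (PySem.List.slice sql.toList (some (((start + 1).toNat : Nat) : Int)) (some p)).all pvValid
    · rw [if_pos hall, if_pos hall]
      simp [hback]
    · rw [if_neg hall, if_neg hall]
      simp

-- ===== VERDICT (by name: the statement is the Claim_ definition above) =====
theorem read_dollar_tag_py_spec : Claim_equal_read_dollar_tag_py := by
  unfold Claim_equal_read_dollar_tag_py
  intro sql start _hdom hpre
  unfold Spec_read_dollar_tag_py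
  have h0 : 0 ≤ start + 1 := by
    unfold Pre_read_dollar_tag_py at hpre; omega
  have hs : (((start + 1).toNat : Nat) : Int) = start + 1 := Int.toNat_of_nonneg h0
  by_cases hle : (start + 1).toNat ≤ sql.toList.length
  · rw [read_dollar_tag_py]
    rw [show start + 1 = (((start + 1).toNat : Nat) : Int) from hs.symm]
    rw [pv_loop_eq_scan sql start (start + 1).toNat,
        pv_alt_eq sql start h0 hle, pv_findVal_eq_scan sql.toList (start + 1).toNat hle]
  · -- start + 1 runs past the end: A's loop never runs, B's find reports -1
    have hgt : (sql.toList.length : Int) < start + 1 := by omega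
    rw [read_dollar_tag_py, read_dollar_tag_loop]
    have hnk : ¬ (start + 1 < PySem.Str.len sql) := by simp only [PySem.Str.len]; omega
    rw [dif_neg hnk]
    have hf : PySem.Chars.findFrom sql.toList ['$'] (start + 1) none = -1 := by
      simp only [PySem.Chars.findFrom]
      rw [if_neg (by omega : ¬ start + 1 < 0), if_pos hgt]
    rw [read_dollar_tag_py_alt]
    simp [hf]
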